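-- pv_equiv track=rewrite | github.com/fnannizzi/advent-of-code | 2024/7/day7.py | eqn_is_valid
-- ===== SOURCE A (Python) =====
-- from enum import Enum
-- import itertools
--
-- class Operator(Enum):
--   ADDITION = 1
--   MULTIPLICATION = 2
--   CONCATENATION = 3
--
-- def generate_all_operator_combinations(num_operators: int, with_concat=False):
--   # n-choose-k with repetition to get all possible operator combinations
--   operator_types = [Operator.MULTIPLICATION, Operator.ADDITION]
--   if with_concat:
--     operator_types.append(Operator.CONCATENATION)
--   return [p for p in itertools.product(operator_types, repeat=num_operators)]
--
-- def concat_nums(left: int, right: int):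
--   return int(str(left) + str(right))
--
-- def calculate_result_from_nums_and_operators(nums: [], operators: []):
--   result = nums[0]
--   for i in range(len(nums[1:])):
--     if operators[i] == Operator.ADDITION:
--       result += nums[i + 1]
--     elif operators[i] == Operator.MULTIPLICATION:
--       result *= nums[i + 1]
--     elif operators[i] == Operator.CONCATENATION:
--       result = concat_nums(result, nums[i + 1])
--     else:
--       assert "Invalid operator type:" + operators[i]
--   return result
--
-- def eqn_is_valid(nums: [], with_concat=False):
--   result = nums[0]
--   # for n numbers, there will be n-1 operators
--   num_operators = len(nums[1:]) - 1
--   operator_combos = generate_all_operator_combinations(num_operators, with_concat)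
--
--   for combo in operator_combos:
--     if calculate_result_from_nums_and_operators(nums[1:], combo) == result:
--       return True
--   return False
-- ===== SOURCE B (Python) =====
-- def eqn_is_valid(nums: [], with_concat=False):
--   # DP over the set of reachable partial results (left-to-right), deduplicated,
--   # instead of enumerating every operator combination.  A concatenation that
--   # would not parse (negative right operand) is simply not a usable step.
--   target = nums[0]
--   reachable = {nums[1]}
--   for n in nums[2:]:
--     nxt = set()
--     for v in reachable:
--       nxt.add(v + n)
--       nxt.add(v * n)
--       if with_concat:
--         try:
--           nxt.add(int(str(v) + str(n)))
--         except ValueError: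
--           pass
--     reachable = nxt
--   return target in reachable
-- ===== Notes on version B (the rewrite author's own statement) =====
-- stated objective: faster
-- what changed: Replaces enumeration of every operator combination (recomputing the whole left-to-right expression for each tuple) with a single left-to-right DP over the deduplicated set of reachable partial results, treating an unparsable concatenation as an unusable step.
-- outside the precondition, e.g. on eqn_is_valid([-6, 2, 3, -1], True): A returns True, B returns True; on eqn_is_valid([5, 2, 3, -1], True): A returns True, B returns True
import Mathlib
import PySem

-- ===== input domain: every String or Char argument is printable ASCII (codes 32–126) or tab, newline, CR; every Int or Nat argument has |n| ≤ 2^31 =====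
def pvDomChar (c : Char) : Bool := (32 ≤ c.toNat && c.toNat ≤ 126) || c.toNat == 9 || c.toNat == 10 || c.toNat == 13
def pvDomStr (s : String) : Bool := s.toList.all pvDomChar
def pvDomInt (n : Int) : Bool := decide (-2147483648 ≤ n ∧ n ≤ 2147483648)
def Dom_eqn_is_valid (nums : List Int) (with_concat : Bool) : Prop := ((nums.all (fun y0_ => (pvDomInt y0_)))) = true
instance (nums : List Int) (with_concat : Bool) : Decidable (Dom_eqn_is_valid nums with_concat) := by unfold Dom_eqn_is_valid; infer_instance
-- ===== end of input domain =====

-- B replaces A's enumeration of all operator tuples with a single set-based DP over reachable partial results.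


-- ===== PORT A =====
-- Operator enum
inductive PvOp where
  | mul | add | cat
deriving DecidableEq, Repr

-- generate_all_operator_combinations: itertools.product(operator_types, repeat=n)
def pvCombos (types : List PvOp) : Nat → List (List PvOp)
  | 0 => [[]]
  | n + 1 => types.flatMap (fun x => (pvCombos types n).map (x :: ·))

-- concat_nums: int(str(left) + str(right)); none exactly where Python raises ValueError
def pvConcatA (l r : Int) : Option Int :=
  PySem.Int.ofChars? (PySem.Int.toChars l ++ PySem.Int.toChars r)

-- calculate_result_from_nums_and_operators: loop pairing operators[i] with nums[i+1]
def pvCalcGo (r : Int) : List PvOp → List Int → Option Int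
  | [], _ => some r
  | _ :: _, [] => none            -- IndexError (never reached in A's use: lengths match)
  | op :: ops, n :: ns =>
    match op with
    | .add => pvCalcGo (r + n) ops ns
    | .mul => pvCalcGo (r * n) ops ns
    | .cat =>
      match pvConcatA r n with
      | some r' => pvCalcGo r' ops ns
      | none => none              -- ValueError in Python (outside Pre_)

def eqn_is_valid (nums : List Int) (with_concat : Bool) : Bool :=
  match nums with
  | target :: r :: rest =>
    let types : List PvOp := if with_concat then [.mul, .add, .cat] else [.mul, .add]
    -- num_operators = len(nums[1:]) - 1 = rest.length
    let combos := pvCombos types rest.length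
    combos.any (fun c => pvCalcGo r c rest == some target)
  | _ => false                    -- Python raises IndexError here (outside Pre_)

-- ===== PORT B =====
-- one DP step: from the set of reachable values, all values reachable after absorbing n
def pvStep (with_concat : Bool) (s : PySem.Set Int) (n : Int) : PySem.Set Int :=
  s.foldl (fun nxt v =>
    let nxt := PySem.Set.add nxt (v + n)
    let nxt := PySem.Set.add nxt (v * n)
    if with_concat then
      match PySem.Int.ofChars? (PySem.Int.toChars v ++ PySem.Int.toChars n) with
      | some c => PySem.Set.add nxt c
      | none => nxt               -- Source B's 'except ValueError: pass'
    else nxt) PySem.Set.empty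

def eqn_is_valid_alt (nums : List Int) (with_concat : Bool) : Bool :=
  match nums with
  | [] => false                   -- Python raises IndexError here (outside Pre_)
  | [_] => false                  -- Python raises IndexError here (outside Pre_)
  | target :: x :: rest =>
    let final := rest.foldl (pvStep with_concat) (PySem.Set.ofList [x])
    PySem.Set.contains final target

-- ===== PRECONDITION & SPEC =====
-- Pre_ excludes inputs with fewer than two numbers (Python A raises IndexError) and with_concat inputs
-- carrying a negative number among nums[2:], on which A raises ValueError at the first enumerated
-- combination that concatenates a negative right operand unless an earlier combination matches first;
-- on the excluded inputs where A still returns (such an early match, always True), B returns the same value.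
def Pre_eqn_is_valid (nums : List Int) (with_concat : Bool) : Prop :=
  2 ≤ nums.length ∧ (with_concat = true → ∀ x ∈ nums.drop 2, 0 ≤ x)
instance (nums : List Int) (with_concat : Bool) : Decidable (Pre_eqn_is_valid nums with_concat) := by
  unfold Pre_eqn_is_valid; infer_instance

def pvWitness_eqn_is_valid : List Int × Bool := ([6, 2, 3], true)

def Spec_eqn_is_valid (nums : List Int) (with_concat : Bool) (out : Bool) : Prop := out = eqn_is_valid_alt nums with_concat
instance (nums : List Int) (with_concat : Bool) (out : Bool) : Decidable (Spec_eqn_is_valid nums with_concat out) := by unfold Spec_eqn_is_valid; infer_instance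

-- ===== CLAIM (what is proved, stated in full; the proofs are below) =====
def Claim_equal_eqn_is_valid : Prop := ∀ (nums : List Int) (with_concat : Bool), Dom_eqn_is_valid nums with_concat → Pre_eqn_is_valid nums with_concat → Spec_eqn_is_valid nums with_concat (eqn_is_valid nums with_concat)

-- ===== LEMMAS AND PROOFS =====

-- membership after one DP step
theorem mem_pvStep_body (wc : Bool) (n t u : Int) (nxt : PySem.Set Int) :
    (t ∈ (let nxt := PySem.Set.add nxt (u + n)
          let nxt := PySem.Set.add nxt (u * n)
          if wc then
            match PySem.Int.ofChars? (PySem.Int.toChars u ++ PySem.Int.toChars n) with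
            | some c => PySem.Set.add nxt c
            | none => nxt
          else nxt)) ↔
    (t ∈ nxt ∨ (t = u + n ∨ t = u * n ∨
      (wc = true ∧ PySem.Int.ofChars? (PySem.Int.toChars u ++ PySem.Int.toChars n) = some t))) := by
  cases wc
  · simp [PySem.Set.mem_add]
    tauto
  · rcases h : PySem.Int.ofChars? (PySem.Int.toChars u ++ PySem.Int.toChars n) with _ | c <;>
      simp [h, PySem.Set.mem_add] <;> tauto

theorem mem_pvStep_aux (wc : Bool) (n t : Int) :
    ∀ (l : List Int) (acc : PySem.Set Int),
    t ∈ l.foldl (fun nxt v =>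
      let nxt := PySem.Set.add nxt (v + n)
      let nxt := PySem.Set.add nxt (v * n)
      if wc then
        match PySem.Int.ofChars? (PySem.Int.toChars v ++ PySem.Int.toChars n) with
        | some c => PySem.Set.add nxt c
        | none => nxt
      else nxt) acc ↔
    t ∈ acc ∨ ∃ u ∈ l, (t = u + n ∨ t = u * n ∨
      (wc = true ∧ PySem.Int.ofChars? (PySem.Int.toChars u ++ PySem.Int.toChars n) = some t))
  | [], acc => by simp
  | v :: l, acc => by
    rw [List.foldl_cons, mem_pvStep_aux wc n t l]
    rw [mem_pvStep_body wc n t v acc]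
    simp only [List.mem_cons]
    constructor
    · rintro ((h | h) | ⟨u, hu, h⟩)
      · exact Or.inl h
      · exact Or.inr ⟨v, Or.inl rfl, h⟩
      · exact Or.inr ⟨u, Or.inr hu, h⟩
    · rintro (h | ⟨u, (rfl | hu), h⟩)
      · exact Or.inl (Or.inl h)
      · exact Or.inl (Or.inr h)
      · exact Or.inr ⟨u, hu, h⟩

theorem mem_pvStep (wc : Bool) (n t : Int) (s : PySem.Set Int) :
    t ∈ pvStep wc s n ↔ ∃ u ∈ s, (t = u + n ∨ t = u * n ∨
      (wc = true ∧ PySem.Int.ofChars? (PySem.Int.toChars u ++ PySem.Int.toChars n) = some t)) := by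
  rw [pvStep, mem_pvStep_aux]
  simp [PySem.Set.empty]

-- combos of length k+1 decompose as one operator followed by a combo of length k
theorem mem_pvCombos_succ (types : List PvOp) (k : Nat) (c : List PvOp) :
    c ∈ pvCombos types (k + 1) ↔ ∃ o ∈ types, ∃ c' ∈ pvCombos types k, c = o :: c' := by
  simp [pvCombos, List.mem_flatMap, List.mem_map]
  tauto

-- the core correspondence: a value is in the folded DP set iff some operator combo computes it
theorem foldl_pvStep_iff (wc : Bool) (t : Int) :
    ∀ (rest : List Int) (s : PySem.Set Int),
      t ∈ rest.foldl (pvStep wc) s ↔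
      ∃ u ∈ s, ∃ c ∈ pvCombos (if wc then [PvOp.mul, .add, .cat] else [PvOp.mul, .add]) rest.length,
        pvCalcGo u c rest = some t
  | [], s => by
    simp [pvCombos, pvCalcGo]
  | n :: rest, s => by
    rw [List.foldl_cons, foldl_pvStep_iff wc t rest (pvStep wc s n)]
    simp only [List.length_cons]
    constructor
    · rintro ⟨u, hu, c, hc, hcalc⟩
      rcases (mem_pvStep wc n u s).1 hu with ⟨w, hw, (rfl | rfl | ⟨hwc, hcat⟩)⟩
      · refine ⟨w, hw, PvOp.add :: c, (mem_pvCombos_succ _ _ _).2 ⟨.add, by cases wc <;> simp, c, hc, rfl⟩, ?_⟩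
        simpa [pvCalcGo] using hcalc
      · refine ⟨w, hw, PvOp.mul :: c, (mem_pvCombos_succ _ _ _).2 ⟨.mul, by cases wc <;> simp, c, hc, rfl⟩, ?_⟩
        simpa [pvCalcGo] using hcalc
      · subst hwc
        refine ⟨w, hw, PvOp.cat :: c, (mem_pvCombos_succ _ _ _).2 ⟨.cat, by simp, c, hc, rfl⟩, ?_⟩
        have hA : pvConcatA w n = some u := hcat
        simpa [pvCalcGo, hA] using hcalc
    · rintro ⟨w, hw, c, hc, hcalc⟩
      rcases (mem_pvCombos_succ _ _ _).1 hc with ⟨o, ho, c', hc', rfl⟩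
      cases o with
      | add =>
        exact ⟨w + n, (mem_pvStep wc n _ s).2 ⟨w, hw, Or.inl rfl⟩, c', hc',
          by simpa [pvCalcGo] using hcalc⟩
      | mul =>
        exact ⟨w * n, (mem_pvStep wc n _ s).2 ⟨w, hw, Or.inr (Or.inl rfl)⟩, c', hc',
          by simpa [pvCalcGo] using hcalc⟩
      | cat =>
        have hwc : wc = true := by
          cases wc
          · simp at ho
          · rfl
        rcases hA : pvConcatA w n with _ | u
        · rw [pvCalcGo, hA] at hcalc
          exact absurd hcalc (by simp)
        · rw [pvCalcGo, hA] at hcalc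
          exact ⟨u, (mem_pvStep wc n _ s).2 ⟨w, hw, Or.inr (Or.inr ⟨hwc, hA⟩)⟩, c', hc', hcalc⟩

-- ===== VERDICT (by name: the statement is the Claim_ definition above) =====
theorem eqn_is_valid_spec : Claim_equal_eqn_is_valid := by
  intro nums wc _ _
  unfold Spec_eqn_is_valid
  match nums with
  | [] => rfl
  | [_] => rfl
  | t :: r :: rest =>
    simp only [eqn_is_valid, eqn_is_valid_alt]
    rw [Bool.eq_iff_iff, List.any_eq_true, PySem.Set.contains_iff, foldl_pvStep_iff]
    simp [PySem.Set.mem_ofList]
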